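-- pv_equiv track=rewrite | github.com/LBNL-UCB-STI/consist | src/consist/core/views.py | _facet_type_to_duckdb
-- ===== SOURCE A (Python) =====
-- from typing import (
--     Any,
--     Dict,
--     List,
--     Literal,
--     Optional,
--     TYPE_CHECKING,
--     Type,
--     TypeVar,
--     Tuple,
-- )
--
-- def _facet_type_to_duckdb(value_types: List[str]) -> str:
--     """
--     Resolve a deterministic DuckDB type from observed ArtifactKV value types.
--     """
--     observed = {t for t in value_types if t and t != "null"}
--     if not observed:
--         return "VARCHAR"
--     if observed == {"bool"}:
--         return "BOOLEAN"
--     if observed == {"int"}: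
--         return "BIGINT"
--     if observed == {"float"} or observed == {"int", "float"}:
--         return "DOUBLE"
--     return "VARCHAR"
-- ===== SOURCE B (Python) =====
-- def _facet_type_to_duckdb(value_types):
--     """Fold the observed types through a small type-promotion lattice:
--     NONE < {BOOL, INT < FLOAT} < TOP, joining pairwise; the lattice join of
--     all tokens determines the DuckDB type (TOP and NONE both map to VARCHAR)."""
--     NONE, BOOL, INT, FLOAT, TOP = 0, 1, 2, 3, 4
--
--     def tok(t):
--         if not t or t == "null":
--             return NONE
--         return {"bool": BOOL, "int": INT, "float": FLOAT}.get(t, TOP)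
--
--     def join(a, b):
--         if a == b or b == NONE:
--             return a
--         if a == NONE:
--             return b
--         if (a, b) in ((INT, FLOAT), (FLOAT, INT)):
--             return FLOAT
--         return TOP
--
--     state = NONE
--     for t in value_types:
--         state = join(state, tok(t))
--     return {BOOL: "BOOLEAN", INT: "BIGINT", FLOAT: "DOUBLE"}.get(state, "VARCHAR")
-- ===== Notes on version B (the rewrite author's own statement) =====
-- stated objective: alternative
-- what changed: Replaces the set comprehension plus four set-equality comparisons with a fold over a 5-element type-promotion lattice: each token maps to a lattice element and the pairwise join of all tokens (NONE/TOP mapping to VARCHAR) determines the result.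
import Mathlib
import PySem

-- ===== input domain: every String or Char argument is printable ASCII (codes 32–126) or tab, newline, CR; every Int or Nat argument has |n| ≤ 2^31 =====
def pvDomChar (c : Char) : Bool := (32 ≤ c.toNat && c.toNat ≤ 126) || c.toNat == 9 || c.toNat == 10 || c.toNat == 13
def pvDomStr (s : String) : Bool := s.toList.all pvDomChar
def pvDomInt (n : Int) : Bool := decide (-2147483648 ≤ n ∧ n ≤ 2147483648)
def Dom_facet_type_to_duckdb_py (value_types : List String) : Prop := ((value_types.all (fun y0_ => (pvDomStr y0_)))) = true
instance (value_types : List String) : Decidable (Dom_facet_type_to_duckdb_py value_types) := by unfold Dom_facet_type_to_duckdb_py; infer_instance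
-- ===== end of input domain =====

-- B folds the tokens through a 5-element type-promotion lattice (join of all tokens) instead of building a set and comparing it for equality (objective: alternative).

-- ===== PORT A =====
def facet_type_to_duckdb_py (value_types : List String) : String :=
  let observed : PySem.Set String :=
    PySem.Set.ofList (value_types.filter (fun t => !(t == "") && !(t == "null")))
  if observed = [] then "VARCHAR"
  else if PySem.Set.equal observed (PySem.Set.ofList ["bool"]) then "BOOLEAN"
  else if PySem.Set.equal observed (PySem.Set.ofList ["int"]) then "BIGINT"
  else if PySem.Set.equal observed (PySem.Set.ofList ["float"]) ||
          PySem.Set.equal observed (PySem.Set.ofList ["int", "float"]) then "DOUBLE"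
  else "VARCHAR"

-- ===== PORT B =====
-- lattice elements are encoded as the same small integers Source B uses: 0=NONE, 1=BOOL, 2=INT, 3=FLOAT, 4=TOP
def facetTok (t : String) : Int :=
  if t == "" || t == "null" then 0
  else if t == "bool" then 1
  else if t == "int" then 2
  else if t == "float" then 3
  else 4

def facetJoin (a b : Int) : Int :=
  if a == b || b == 0 then a
  else if a == 0 then b
  else if (a == 2 && b == 3) || (a == 3 && b == 2) then 3
  else 4

def facet_type_to_duckdb_py_alt (value_types : List String) : String :=
  let st := value_types.foldl (fun s t => facetJoin s (facetTok t)) 0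
  if st == 1 then "BOOLEAN"
  else if st == 2 then "BIGINT"
  else if st == 3 then "DOUBLE"
  else "VARCHAR"

-- ===== PRECONDITION & SPEC =====
def Spec_facet_type_to_duckdb_py (value_types : List String) (out : String) : Prop := out = facet_type_to_duckdb_py_alt value_types
instance (value_types : List String) (out : String) : Decidable (Spec_facet_type_to_duckdb_py value_types out) := by unfold Spec_facet_type_to_duckdb_py; infer_instance

-- ===== CLAIM (what is proved, stated in full; the proofs are below) =====
def Claim_equal_facet_type_to_duckdb_py : Prop := ∀ (value_types : List String), Dom_facet_type_to_duckdb_py value_types → Spec_facet_type_to_duckdb_py value_types (facet_type_to_duckdb_py value_types)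

-- ===== LEMMAS AND PROOFS =====

-- proof-only bookkeeping: which of the four token kinds has occurred so far
def facetFlagsStep (st : Bool × Bool × Bool × Bool) (t : String) : Bool × Bool × Bool × Bool :=
  if t == "" || t == "null" then st
  else if t == "bool" then (true, st.2.1, st.2.2.1, st.2.2.2)
  else if t == "int" then (st.1, true, st.2.2.1, st.2.2.2)
  else if t == "float" then (st.1, st.2.1, true, st.2.2.2)
  else (st.1, st.2.1, st.2.2.1, true)

-- the lattice element determined by a flag quadruple
def facetEncode (st : Bool × Bool × Bool × Bool) : Int :=
  if st.2.2.2 then 4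
  else if st.1 then (if st.2.1 || st.2.2.1 then 4 else 1)
  else if st.2.2.1 then 3
  else if st.2.1 then 2
  else 0

theorem facetJoin_step (st : Bool × Bool × Bool × Bool) (x : String) :
    facetJoin (facetEncode st) (facetTok x) = facetEncode (facetFlagsStep st x) := by
  obtain ⟨b, i, f, o⟩ := st
  by_cases h0 : x = "" ∨ x = "null"
  · rcases h0 with h | h <;> subst h <;>
      cases b <;> cases i <;> cases f <;> cases o <;> decide
  · rcases not_or.mp h0 with ⟨h1, h2⟩
    have e1 : (x == "") = false := by simp [h1]
    have e2 : (x == "null") = false := by simp [h2]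
    by_cases hb : x = "bool"
    · subst hb; cases b <;> cases i <;> cases f <;> cases o <;> decide
    · by_cases hi : x = "int"
      · subst hi; cases b <;> cases i <;> cases f <;> cases o <;> decide
      · by_cases hf : x = "float"
        · subst hf; cases b <;> cases i <;> cases f <;> cases o <;> decide
        · have e3 : (x == "bool") = false := by simp [hb]
          have e4 : (x == "int") = false := by simp [hi]
          have e5 : (x == "float") = false := by simp [hf]
          simp only [facetTok, facetFlagsStep, e1, e2, e3, e4, e5, Bool.or_self]
          cases b <;> cases i <;> cases f <;> cases o <;> decide

-- B's lattice fold computes the encoding of the flag fold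
theorem facetFold_encode (l : List String) (st : Bool × Bool × Bool × Bool) :
    l.foldl (fun s t => facetJoin s (facetTok t)) (facetEncode st) =
      facetEncode (l.foldl facetFlagsStep st) := by
  induction l generalizing st with
  | nil => rfl
  | cons x xs ih =>
    simp only [List.foldl_cons, facetJoin_step]
    exact ih _

-- the flag fold accumulates each flag as "this kind of value occurs in the list"
theorem facetFlags_foldl (l : List String) (b i f o : Bool) :
    l.foldl facetFlagsStep (b, i, f, o) =
      (b || l.any (· == "bool"), i || l.any (· == "int"), f || l.any (· == "float"),
       o || l.any (fun t => !(t == "") && !(t == "null") && !(t == "bool") && !(t == "int") && !(t == "float"))) := by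
  induction l generalizing b i f o with
  | nil => simp
  | cons x xs ih =>
    simp only [List.foldl_cons, List.any_cons]
    rw [facetFlagsStep]
    by_cases hx0 : x = "" ∨ x = "null"
    · rcases hx0 with h | h <;> subst h <;> simp [ih]
    · rcases not_or.mp hx0 with ⟨h1, h2⟩
      by_cases hb : x = "bool"
      · subst hb; simp [ih]
      · by_cases hi : x = "int"
        · subst hi; simp [ih]
        · by_cases hf : x = "float"
          · subst hf; simp [ih]
          · have e1 : (x == "bool") = false := by simp [hb]
            have e2 : (x == "int") = false := by simp [hi]
            have e3 : (x == "float") = false := by simp [hf]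
            simp [h1, h2, e1, e2, e3, ih]

set_option maxHeartbeats 2000000 in
theorem facet_type_to_duckdb_py_spec_aux (l : List String) :
    facet_type_to_duckdb_py l = facet_type_to_duckdb_py_alt l := by
  unfold facet_type_to_duckdb_py facet_type_to_duckdb_py_alt
  have hstart : (0 : Int) = facetEncode (false, false, false, false) := rfl
  rw [hstart, facetFold_encode, facetFlags_foldl]
  simp only [Bool.false_or]
  set filt := l.filter (fun t => !(t == "") && !(t == "null")) with hfilt
  have hmem : ∀ x, x ∈ filt ↔ x ∈ l ∧ x ≠ "" ∧ x ≠ "null" := by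
    intro x; simp [hfilt, List.mem_filter]
  have hany : ∀ s : String, (l.any (· == s) = true) ↔ s ∈ l := by
    intro s; simp [List.any_eq_true]
  have hAo : (l.any (fun t => !(t == "") && !(t == "null") && !(t == "bool") && !(t == "int") && !(t == "float")) = true)
      ↔ ∃ x ∈ l, x ≠ "" ∧ x ≠ "null" ∧ x ≠ "bool" ∧ x ≠ "int" ∧ x ≠ "float" := by
    simp [List.any_eq_true, and_assoc]
  have hmemf : ∀ s : String, s ≠ "" → s ≠ "null" → (s ∈ filt ↔ s ∈ l) := by
    intro s h1 h2; rw [hmem]; tauto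
  set Ab := l.any (· == "bool") with hAbd
  set Ai := l.any (· == "int") with hAid
  set Af := l.any (· == "float") with hAfd
  set Ao := l.any (fun t => !(t == "") && !(t == "null") && !(t == "bool") && !(t == "int") && !(t == "float")) with hAod
  -- x survives the filter only if it is one of the three names or raises the "other" flag
  have hsurv : ∀ x ∈ filt, (x = "bool" ∧ Ab = true) ∨ (x = "int" ∧ Ai = true) ∨ (x = "float" ∧ Af = true) ∨ Ao = true := by
    intro x hx
    obtain ⟨hxl, h1, h2⟩ := (hmem x).mp hx
    by_cases hb : x = "bool"
    · exact Or.inl ⟨hb, (hany _).mpr (hb ▸ hxl)⟩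
    · by_cases hi : x = "int"
      · exact Or.inr (Or.inl ⟨hi, (hany _).mpr (hi ▸ hxl)⟩)
      · by_cases hf : x = "float"
        · exact Or.inr (Or.inr (Or.inl ⟨hf, (hany _).mpr (hf ▸ hxl)⟩))
        · exact Or.inr (Or.inr (Or.inr (hAo.mpr ⟨x, hxl, h1, h2, hb, hi, hf⟩)))
  have hin : ∀ s : String, s ≠ "" → s ≠ "null" → (l.any (· == s) = true → s ∈ filt) := by
    intro s h1 h2 h; exact (hmemf s h1 h2).mpr ((hany s).mp h)
  -- the five conditions A tests, characterised by the four occurrence flags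
  have E0 : (PySem.Set.ofList filt = []) ↔ (Ab = false ∧ Ai = false ∧ Af = false ∧ Ao = false) := by
    have hof : (PySem.Set.ofList filt = []) ↔ filt = [] := by
      cases hF : filt with
      | nil => simp [PySem.Set.ofList]
      | cons y ys => rw [PySem.Set.ofList_cons]; simp
    rw [hof]
    constructor
    · intro h
      have hni : ∀ x, x ∉ filt := by intro x hx; rw [h] at hx; exact List.not_mem_nil hx
      refine ⟨?_, ?_, ?_, ?_⟩
      · rw [← Bool.not_eq_true]; exact fun hc => hni _ (hin "bool" (by decide) (by decide) hc)
      · rw [← Bool.not_eq_true]; exact fun hc => hni _ (hin "int" (by decide) (by decide) hc)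
      · rw [← Bool.not_eq_true]; exact fun hc => hni _ (hin "float" (by decide) (by decide) hc)
      · rw [← Bool.not_eq_true, hAo]
        rintro ⟨x, hx, h1, h2, _, _, _⟩
        exact hni x ((hmem x).mpr ⟨hx, h1, h2⟩)
    · rintro ⟨h1, h2, h3, h4⟩
      rw [List.eq_nil_iff_forall_not_mem]
      intro x hx
      rcases hsurv x hx with ⟨_, h⟩ | ⟨_, h⟩ | ⟨_, h⟩ | h <;> simp_all
  have hchar : ∀ t : List String,
      (PySem.Set.equal (PySem.Set.ofList filt) (PySem.Set.ofList t) = true) ↔ (∀ x, x ∈ filt ↔ x ∈ t) := by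
    intro t
    rw [PySem.Set.equal_iff]
    constructor
    · intro h x; rw [← PySem.Set.mem_ofList filt x, h x, PySem.Set.mem_ofList]
    · intro h x; rw [PySem.Set.mem_ofList, PySem.Set.mem_ofList]; exact h x
  have EB : (PySem.Set.equal (PySem.Set.ofList filt) (PySem.Set.ofList ["bool"]) = true)
      ↔ (Ab = true ∧ Ai = false ∧ Af = false ∧ Ao = false) := by
    rw [hchar]
    constructor
    · intro h
      have hb : "bool" ∈ filt := (h "bool").mpr (by simp)
      refine ⟨(hany _).mpr ((hmemf "bool" (by decide) (by decide)).mp hb), ?_, ?_, ?_⟩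
      · rw [← Bool.not_eq_true]
        intro hc; have := (h "int").mp (hin "int" (by decide) (by decide) hc); simp at this
      · rw [← Bool.not_eq_true]
        intro hc; have := (h "float").mp (hin "float" (by decide) (by decide) hc); simp at this
      · rw [← Bool.not_eq_true, hAo]
        rintro ⟨x, hx, h1, h2, h3, _, _⟩
        exact h3 (by simpa using (h x).mp ((hmem x).mpr ⟨hx, h1, h2⟩))
    · rintro ⟨h1, h2, h3, h4⟩
      intro x
      constructor
      · intro hx
        rcases hsurv x hx with ⟨he, _⟩ | ⟨_, h⟩ | ⟨_, h⟩ | h <;> simp_all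
      · intro hx; simp at hx; subst hx
        exact hin "bool" (by decide) (by decide) h1
  have EI : (PySem.Set.equal (PySem.Set.ofList filt) (PySem.Set.ofList ["int"]) = true)
      ↔ (Ai = true ∧ Ab = false ∧ Af = false ∧ Ao = false) := by
    rw [hchar]
    constructor
    · intro h
      have hb : "int" ∈ filt := (h "int").mpr (by simp)
      refine ⟨(hany _).mpr ((hmemf "int" (by decide) (by decide)).mp hb), ?_, ?_, ?_⟩
      · rw [← Bool.not_eq_true]
        intro hc; have := (h "bool").mp (hin "bool" (by decide) (by decide) hc); simp at this
      · rw [← Bool.not_eq_true]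
        intro hc; have := (h "float").mp (hin "float" (by decide) (by decide) hc); simp at this
      · rw [← Bool.not_eq_true, hAo]
        rintro ⟨x, hx, h1, h2, _, h4, _⟩
        exact h4 (by simpa using (h x).mp ((hmem x).mpr ⟨hx, h1, h2⟩))
    · rintro ⟨h1, h2, h3, h4⟩
      intro x
      constructor
      · intro hx
        rcases hsurv x hx with ⟨_, h⟩ | ⟨he, _⟩ | ⟨_, h⟩ | h <;> simp_all
      · intro hx; simp at hx; subst hx
        exact hin "int" (by decide) (by decide) h1
  have EF : (PySem.Set.equal (PySem.Set.ofList filt) (PySem.Set.ofList ["float"]) = true)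
      ↔ (Af = true ∧ Ab = false ∧ Ai = false ∧ Ao = false) := by
    rw [hchar]
    constructor
    · intro h
      have hb : "float" ∈ filt := (h "float").mpr (by simp)
      refine ⟨(hany _).mpr ((hmemf "float" (by decide) (by decide)).mp hb), ?_, ?_, ?_⟩
      · rw [← Bool.not_eq_true]
        intro hc; have := (h "bool").mp (hin "bool" (by decide) (by decide) hc); simp at this
      · rw [← Bool.not_eq_true]
        intro hc; have := (h "int").mp (hin "int" (by decide) (by decide) hc); simp at this
      · rw [← Bool.not_eq_true, hAo]
        rintro ⟨x, hx, h1, h2, _, _, h5⟩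
        exact h5 (by simpa using (h x).mp ((hmem x).mpr ⟨hx, h1, h2⟩))
    · rintro ⟨h1, h2, h3, h4⟩
      intro x
      constructor
      · intro hx
        rcases hsurv x hx with ⟨_, h⟩ | ⟨_, h⟩ | ⟨he, _⟩ | h <;> simp_all
      · intro hx; simp at hx; subst hx
        exact hin "float" (by decide) (by decide) h1
  have EIF : (PySem.Set.equal (PySem.Set.ofList filt) (PySem.Set.ofList ["int", "float"]) = true)
      ↔ (Ai = true ∧ Af = true ∧ Ab = false ∧ Ao = false) := by
    rw [hchar]
    constructor
    · intro h
      have hi : "int" ∈ filt := (h "int").mpr (by simp)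
      have hf : "float" ∈ filt := (h "float").mpr (by simp)
      refine ⟨(hany _).mpr ((hmemf "int" (by decide) (by decide)).mp hi),
              (hany _).mpr ((hmemf "float" (by decide) (by decide)).mp hf), ?_, ?_⟩
      · rw [← Bool.not_eq_true]
        intro hc; have := (h "bool").mp (hin "bool" (by decide) (by decide) hc); simp at this
      · rw [← Bool.not_eq_true, hAo]
        rintro ⟨x, hx, h1, h2, _, h4, h5⟩
        have := (h x).mp ((hmem x).mpr ⟨hx, h1, h2⟩)
        simp at this
        rcases this with h | h
        · exact h4 h
        · exact h5 h
    · rintro ⟨h1, h2, h3, h4⟩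
      intro x
      constructor
      · intro hx
        rcases hsurv x hx with ⟨_, h⟩ | ⟨he, _⟩ | ⟨he, _⟩ | h <;> simp_all
      · intro hx; simp at hx
        rcases hx with hx | hx <;> subst hx
        · exact hin "int" (by decide) (by decide) h1
        · exact hin "float" (by decide) (by decide) h2
  -- case analysis over the four occurrence flags; each A-side test is decided by the characterisations
  cases hb' : Ab <;> cases hi' : Ai <;> cases hf' : Af <;> cases ho' : Ao <;>
    simp only [hb', hi', hf', ho'] at E0 EB EI EF EIF <;>
    simp [E0, EB, EI, EF, EIF, facetEncode]

-- ===== VERDICT (by name: the statement is the Claim_ definition above) =====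
theorem facet_type_to_duckdb_py_spec : Claim_equal_facet_type_to_duckdb_py := by
  intro l _
  unfold Spec_facet_type_to_duckdb_py
  exact facet_type_to_duckdb_py_spec_aux l
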